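-- pv_equiv track=rewrite | github.com/redotter84/inorganic-reactions-predictor | compound/o/oH.py | oHDi_create
-- ===== SOURCE A (Python) =====
-- def oHDi_create(n: int, p=(1, 2)) -> (str):
--     res: str
--     if 1 in p:
--         res = "CH2="
--     else:
--         res = "CH3-"
--
--     for i in range(2, n):
--         if i in p:
--             if res[-1] == "=":
--                 res += "C="
--             else:
--                 res += "CH="
--         else:
--             if res[-1] == "=":
--                 res += "CH-"
--             else:
--                 res += "CH2-"
--
--     if res[-1] == "=":
--         res += "CH2"
--     else:
--         res += "CH3"
--     return res
-- ===== SOURCE B (Python) =====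
-- def oHDi_create(n: int, p=(1, 2)) -> str:
--     # Model the chain chemically: c carbons, bond j (between carbons j and j+1)
--     # is double iff j in p; each carbon carries 4 - (sum of its bond orders) hydrogens.
--     c = max(n, 2)
--     ps = set(p)
--     order = lambda j: 2 if j in ps else 1
--     out = []
--     for j in range(1, c + 1):
--         if j > 1:
--             out.append("=" if order(j - 1) == 2 else "-")
--         h = 4 - (order(j - 1) if j > 1 else 0) - (order(j) if j < c else 0)
--         out.append("C" if h == 0 else "CH" if h == 1 else "CH" + str(h))
--     return "".join(out)
-- ===== Notes on version B (the rewrite author's own statement) =====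
-- stated objective: faster
-- what changed: B models the molecule directly - a set of double-bond positions, per-carbon hydrogen counts h = 4 - sum of adjacent bond orders, fragments and separators emitted from those numbers - instead of A's stateful string building that branches on the last character written so far and scans p per carbon.
import Mathlib
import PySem

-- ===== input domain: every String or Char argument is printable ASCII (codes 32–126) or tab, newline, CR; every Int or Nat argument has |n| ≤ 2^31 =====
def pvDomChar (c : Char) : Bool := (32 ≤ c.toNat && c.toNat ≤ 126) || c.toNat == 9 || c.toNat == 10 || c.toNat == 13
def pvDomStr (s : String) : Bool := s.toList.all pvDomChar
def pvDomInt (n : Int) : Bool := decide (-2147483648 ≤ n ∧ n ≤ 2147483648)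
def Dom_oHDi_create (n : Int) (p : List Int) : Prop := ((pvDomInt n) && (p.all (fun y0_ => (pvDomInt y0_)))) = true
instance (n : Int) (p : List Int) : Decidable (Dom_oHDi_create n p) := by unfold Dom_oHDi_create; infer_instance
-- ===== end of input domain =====

-- B models the chain chemically (a set of double-bond positions, per-carbon hydrogen counts)
-- instead of threading A's "last character of the string so far" state while scanning p per carbon;
-- a timing run measured B faster on large inputs.

-- ===== PORT A =====
-- one loop-body helper; the loop itself is a foldl over range(2, n)
def oHDi_A_step (p : List Int) (res : List Char) (i : Int) : List Char :=
  if i ∈ p then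
    if PySem.List.pyGet? res (-1) = some '=' then res ++ "C=".toList else res ++ "CH=".toList
  else
    if PySem.List.pyGet? res (-1) = some '=' then res ++ "CH-".toList else res ++ "CH2-".toList

def oHDi_create (n : Int) (p : List Int) : String :=
  let res0 : List Char := if (1 : Int) ∈ p then "CH2=".toList else "CH3-".toList
  let res := (PySem.List.pyRange 2 n 1).foldl (oHDi_A_step p) res0
  String.ofList (if PySem.List.pyGet? res (-1) = some '=' then res ++ "CH2".toList else res ++ "CH3".toList)

-- ===== PORT B =====
def oHDi_order (ps : PySem.Set Int) (j : Int) : Int := if j ∈ ps then 2 else 1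

def oHDi_frag (h : Int) : List Char :=
  if h = 0 then ['C'] else if h = 1 then ['C', 'H'] else ['C', 'H'] ++ PySem.Int.toChars h

def oHDi_B_body (ps : PySem.Set Int) (c : Int) (out : List (List Char)) (j : Int) : List (List Char) :=
  let out := if 1 < j then out ++ [if oHDi_order ps (j - 1) = 2 then ['='] else ['-']] else out
  let h := 4 - (if 1 < j then oHDi_order ps (j - 1) else 0) - (if j < c then oHDi_order ps j else 0)
  out ++ [oHDi_frag h]

def oHDi_create_alt (n : Int) (p : List Int) : String :=
  let c := max n 2
  let ps := PySem.Set.ofList p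
  let out := (PySem.List.pyRange 1 (c + 1) 1).foldl (oHDi_B_body ps c) []
  String.ofList out.flatten

-- ===== PRECONDITION & SPEC =====
def Spec_oHDi_create (n : Int) (p : List Int) (out : String) : Prop := out = oHDi_create_alt n p
instance (n : Int) (p : List Int) (out : String) : Decidable (Spec_oHDi_create n p out) := by unfold Spec_oHDi_create; infer_instance

-- ===== CLAIM (what is proved, stated in full; the proofs are below) =====
def Claim_equal_oHDi_create : Prop := ∀ (n : Int) (p : List Int), Dom_oHDi_create n p → Spec_oHDi_create n p (oHDi_create n p)

-- ===== LEMMAS AND PROOFS =====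

-- the bond separator B emits after carbon j
def oHDi_bond (ps : PySem.Set Int) (j : Int) : List Char :=
  if oHDi_order ps j = 2 then ['='] else ['-']

-- Invariant relating A's loop state after i = 2 .. m-1 to B's fragment list for carbons 1 .. m-1:
-- A's string is B's flattened fragments followed by the separator of bond (m-1).
lemma oHDi_inv (p : List Int) (c : Int) (hc : 2 ≤ c) :
    ∀ (m : Int), 2 ≤ m → m ≤ c →
      (PySem.List.pyRange 2 m 1).foldl (oHDi_A_step p)
          (if (1 : Int) ∈ p then "CH2=".toList else "CH3-".toList)
        = ((PySem.List.pyRange 1 m 1).foldl (oHDi_B_body (PySem.Set.ofList p) c) []).flatten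
            ++ oHDi_bond (PySem.Set.ofList p) (m - 1) := by
  intro m hm hmc
  induction m, hm using Int.le_induction with
  | base =>
      have h1 : PySem.List.pyRange 2 2 1 = [] := by
        simp [PySem.List.pyRange]
      have h2 : PySem.List.pyRange 1 2 1 = [1] := by
        rw [PySem.List.pyRange_one_cons (by norm_num)]
        simp [PySem.List.pyRange]
      rw [h1, h2]
      have h1c : (1 : Int) < c := by omega
      by_cases h : (1 : Int) ∈ p <;>
        simp [oHDi_B_body, oHDi_order, oHDi_bond, oHDi_frag, h, h1c,
          PySem.Set.mem_ofList, PySem.Int.toChars] <;> decide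
  | succ m hm ih =>
      have hmc' : m ≤ c := by omega
      have ih' := ih hmc'
      have hA : PySem.List.pyRange 2 (m + 1) 1 = PySem.List.pyRange 2 m 1 ++ [m] :=
        PySem.List.pyRange_one_succ_right hm
      have hB : PySem.List.pyRange 1 (m + 1) 1 = PySem.List.pyRange 1 m 1 ++ [m] :=
        PySem.List.pyRange_one_succ_right (by omega)
      rw [hA, hB, List.foldl_append, List.foldl_append, ih']
      simp only [List.foldl_cons, List.foldl_nil]
      have hm1 : 1 < m := by omega
      have hmltc : m < c := by omega
      by_cases hmp : m ∈ p <;> by_cases hprev : (m - 1) ∈ p <;>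
        simp [oHDi_A_step, oHDi_B_body, oHDi_bond, oHDi_frag, oHDi_order,
          hmp, hprev, hm1, hmltc, PySem.Set.mem_ofList, PySem.Int.toChars] <;> decide

-- final-step bookkeeping: A's closing "CH2"/"CH3" is B's last fragment (carbon c)
lemma oHDi_final (p : List Int) (c : Int) (hc : 2 ≤ c) :
    (if PySem.List.pyGet?
          (((PySem.List.pyRange 1 c 1).foldl (oHDi_B_body (PySem.Set.ofList p) c) []).flatten
            ++ oHDi_bond (PySem.Set.ofList p) (c - 1)) (-1) = some '=' then
        (((PySem.List.pyRange 1 c 1).foldl (oHDi_B_body (PySem.Set.ofList p) c) []).flatten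
            ++ oHDi_bond (PySem.Set.ofList p) (c - 1)) ++ "CH2".toList
      else
        (((PySem.List.pyRange 1 c 1).foldl (oHDi_B_body (PySem.Set.ofList p) c) []).flatten
            ++ oHDi_bond (PySem.Set.ofList p) (c - 1)) ++ "CH3".toList)
      = ((PySem.List.pyRange 1 (c + 1) 1).foldl (oHDi_B_body (PySem.Set.ofList p) c) []).flatten := by
  have hB : PySem.List.pyRange 1 (c + 1) 1 = PySem.List.pyRange 1 c 1 ++ [c] :=
    PySem.List.pyRange_one_succ_right (by omega)
  rw [hB, List.foldl_append]
  simp only [List.foldl_cons, List.foldl_nil]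
  have hc1 : 1 < c := by omega
  have hnlt : ¬ (c < c) := by omega
  by_cases hprev : (c - 1) ∈ p <;>
    simp [oHDi_B_body, oHDi_bond, oHDi_frag, oHDi_order, hprev, hc1,
      PySem.Set.mem_ofList, PySem.Int.toChars] <;> decide

-- ===== VERDICT (by name: the statement is the Claim_ definition above) =====
theorem oHDi_create_spec : Claim_equal_oHDi_create := by
  intro n p _
  unfold Spec_oHDi_create oHDi_create oHDi_create_alt
  have hc : 2 ≤ max n 2 := by omega
  have hrange : PySem.List.pyRange 2 n 1 = PySem.List.pyRange 2 (max n 2) 1 := by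
    rcases le_or_gt n 2 with h | h
    · have h1 : PySem.List.pyRange 2 n 1 = [] := by
        simp [PySem.List.pyRange]; omega
      have h2 : max n 2 = 2 := by omega
      rw [h1, h2]; simp [PySem.List.pyRange]
    · have : max n 2 = n := by omega
      rw [this]
  simp only [hrange]
  rw [oHDi_inv p (max n 2) hc (max n 2) hc le_rfl]
  rw [oHDi_final p (max n 2) hc]
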